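-- pv_equiv track=rewrite | github.com/teotro/artifacts | traceq/helper.py | filter_non_overlapping_paths
-- ===== SOURCE A (Python) =====
-- def filter_non_overlapping_paths(solutions):
--     """
--     Filters out solutions where any of the paths in a solution overlap in tiles.
--     Assumes solutions are in the form: [ [ ((q1, q2), path), ((q3, q4), path2), ... ], ... ]
--     """
--     valid = []
--     for sol in solutions:
--         seen = set()
--         overlap = False
--         for _, path in sol:
--             for tile in path:
--                 if tile in seen:
--                     overlap = True
--                     break
--                 seen.add(tile)
--             if overlap:
--                 break
--         if not overlap:
--             valid.append(sol)
--     return valid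
-- ===== SOURCE B (Python) =====
-- def _no_dup(tiles):
--     # brute-force pairwise check by recursion: no hashing, no set
--     if not tiles:
--         return True
--     head, rest = tiles[0], tiles[1:]
--     return head not in rest and _no_dup(rest)
--
--
-- def filter_non_overlapping_paths(solutions):
--     """
--     Filters out solutions where any of the paths in a solution overlap in tiles.
--     Assumes solutions are in the form: [ [ ((q1, q2), path), ((q3, q4), path2), ... ], ... ]
--     """
--     return [sol for sol in solutions
--             if _no_dup([tile for _, path in sol for tile in path])]
-- ===== Notes on version B (the rewrite author's own statement) =====
-- stated objective: alternative
-- what changed: Replaces A's incremental seen-set with early-exit break logic by a list comprehension filtering solutions with a recursive brute-force pairwise-distinctness check (head not in rest) that uses no set or hashing at all.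
import Mathlib
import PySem

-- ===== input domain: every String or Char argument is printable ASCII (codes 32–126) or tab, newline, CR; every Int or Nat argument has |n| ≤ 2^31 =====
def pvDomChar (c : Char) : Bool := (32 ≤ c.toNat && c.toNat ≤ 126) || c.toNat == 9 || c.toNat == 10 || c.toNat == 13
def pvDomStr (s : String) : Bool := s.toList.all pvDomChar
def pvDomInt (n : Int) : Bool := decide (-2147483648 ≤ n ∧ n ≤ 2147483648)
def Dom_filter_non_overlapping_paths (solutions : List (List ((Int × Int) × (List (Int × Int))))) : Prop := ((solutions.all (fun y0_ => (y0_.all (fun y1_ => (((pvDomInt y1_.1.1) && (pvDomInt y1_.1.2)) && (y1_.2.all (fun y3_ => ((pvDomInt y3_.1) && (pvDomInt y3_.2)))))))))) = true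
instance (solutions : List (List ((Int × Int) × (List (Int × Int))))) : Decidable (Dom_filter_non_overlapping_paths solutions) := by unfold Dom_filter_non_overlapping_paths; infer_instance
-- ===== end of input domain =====

-- B filters solutions with a recursive brute-force pairwise-distinctness check (head not in rest)
-- on the flattened tile list, using no set, seen-state or break logic; objective: alternative.

-- ===== PORT A =====
-- inner 'for tile in path' loop with its break: returns the updated seen set and the overlap flag
def pvAInner (path : List (Int × Int)) (seen : PySem.Set (Int × Int)) :
    PySem.Set (Int × Int) × Bool :=
  match path with
  | [] => (seen, false)
  | tile :: rest =>
      if PySem.Set.contains seen tile then (seen, true)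
      else pvAInner rest (PySem.Set.add seen tile)

-- middle 'for _, path in sol' loop with its break: returns the overlap flag
def pvASol (sol : List ((Int × Int) × (List (Int × Int)))) (seen : PySem.Set (Int × Int)) : Bool :=
  match sol with
  | [] => false
  | (_, path) :: rest =>
      let r := pvAInner path seen
      if r.2 then true else pvASol rest r.1

def filter_non_overlapping_paths (solutions : List (List ((Int × Int) × (List (Int × Int))))) :
    List (List ((Int × Int) × (List (Int × Int)))) :=
  solutions.foldl
    (fun valid sol => if pvASol sol PySem.Set.empty then valid else valid ++ [sol]) []

-- ===== PORT B =====
-- recursive _no_dup: tiles[0] not in tiles[1:] and _no_dup(tiles[1:])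
def pvNoDup : List (Int × Int) → Bool
  | [] => true
  | head :: rest => (!rest.contains head) && pvNoDup rest

-- [tile for _, path in sol for tile in path]
def pvBTiles (sol : List ((Int × Int) × (List (Int × Int)))) : List (Int × Int) :=
  sol.flatMap (fun p => p.2)

def filter_non_overlapping_paths_alt (solutions : List (List ((Int × Int) × (List (Int × Int))))) :
    List (List ((Int × Int) × (List (Int × Int)))) :=
  solutions.filter (fun sol => pvNoDup (pvBTiles sol))

-- ===== PRECONDITION & SPEC =====
def Spec_filter_non_overlapping_paths (solutions : List (List ((Int × Int) × (List (Int × Int))))) (out : List (List ((Int × Int) × (List (Int × Int))))) : Prop := out = filter_non_overlapping_paths_alt solutions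
instance (solutions : List (List ((Int × Int) × (List (Int × Int))))) (out : List (List ((Int × Int) × (List (Int × Int))))) : Decidable (Spec_filter_non_overlapping_paths solutions out) := by unfold Spec_filter_non_overlapping_paths; infer_instance

-- ===== CLAIM (what is proved, stated in full; the proofs are below) =====
def Claim_equal_filter_non_overlapping_paths : Prop := ∀ (solutions : List (List ((Int × Int) × (List (Int × Int))))), Dom_filter_non_overlapping_paths solutions → Spec_filter_non_overlapping_paths solutions (filter_non_overlapping_paths solutions)

-- ===== LEMMAS AND PROOFS =====

-- when no tile of `path` repeats or is already seen, the inner loop finishes without a break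
lemma pvAInner_nodup (path : List (Int × Int)) (seen : PySem.Set (Int × Int))
    (h : (seen ++ path).Nodup) : pvAInner path seen = (seen ++ path, false) := by
  induction path generalizing seen with
  | nil => simp [pvAInner]
  | cons t rest ih =>
      have ht : t ∉ seen := by
        intro hmem
        exact (List.disjoint_of_nodup_append h) hmem (by simp)
      rw [pvAInner]
      rw [if_neg (by simpa [PySem.Set.contains_iff] using ht)]
      rw [PySem.Set.add_of_not_mem ht, ih (seen ++ [t]) (by simpa using h)]
      simp

-- when some tile repeats, the inner loop breaks with overlap = True
lemma pvAInner_dup (path : List (Int × Int)) (seen : PySem.Set (Int × Int))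
    (hseen : seen.Nodup) (h : ¬ (seen ++ path).Nodup) : (pvAInner path seen).2 = true := by
  induction path generalizing seen with
  | nil => simp at h; exact absurd hseen h
  | cons t rest ih =>
      rw [pvAInner]
      by_cases ht : t ∈ seen
      · simp [ht]
      · rw [if_neg (by simpa using ht), PySem.Set.add_of_not_mem ht]
        have hnd : (seen ++ [t]).Nodup := by
          rw [List.nodup_append]
          refine ⟨hseen, List.nodup_singleton t, ?_⟩
          intro p hp q hq
          rw [List.mem_singleton] at hq
          subst hq
          exact fun he => ht (he ▸ hp)
        exact ih (seen ++ [t]) hnd (by simpa using h)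

-- A's middle loop reports overlap exactly when seen ++ (all tiles of sol) has a duplicate
lemma pvASol_spec (sol : List ((Int × Int) × (List (Int × Int)))) (seen : PySem.Set (Int × Int))
    (hseen : seen.Nodup) : pvASol sol seen = !decide ((seen ++ pvBTiles sol).Nodup) := by
  induction sol generalizing seen with
  | nil => simp [pvASol, pvBTiles, hseen]
  | cons hd rest ih =>
      obtain ⟨q, path⟩ := hd
      rw [pvASol]
      by_cases hp : (seen ++ path).Nodup
      · rw [pvAInner_nodup path seen hp]
        simp only [Bool.false_eq_true, if_false]
        rw [ih (seen ++ path) hp]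
        simp [pvBTiles, List.append_assoc]
      · rw [show (pvAInner path seen).2 = true from pvAInner_dup path seen hseen hp]
        simp only [if_true]
        have : ¬ (seen ++ pvBTiles ((q, path) :: rest)).Nodup := by
          intro hno
          apply hp
          have hsub : (seen ++ path).Sublist (seen ++ pvBTiles ((q, path) :: rest)) := by
            simp only [pvBTiles, List.flatMap_cons, ← List.append_assoc]
            exact List.sublist_append_left _ _
          exact hno.sublist hsub
        simp [this]

-- B's recursive brute-force check decides Nodup
lemma pvNoDup_eq (xs : List (Int × Int)) : pvNoDup xs = decide xs.Nodup := by
  induction xs with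
  | nil => simp [pvNoDup]
  | cons h rest ih => simp [pvNoDup, ih, List.nodup_cons]

theorem pv_spec_aux (solutions : List (List ((Int × Int) × (List (Int × Int)))))
    (acc : List (List ((Int × Int) × (List (Int × Int))))) :
    solutions.foldl
      (fun valid sol => if pvASol sol PySem.Set.empty then valid else valid ++ [sol]) acc
    = acc ++ solutions.filter (fun sol => pvNoDup (pvBTiles sol)) := by
  induction solutions generalizing acc with
  | nil => simp
  | cons sol rest ih =>
      simp only [List.foldl_cons, List.filter_cons]
      rw [pvASol_spec sol PySem.Set.empty (by simp [PySem.Set.empty]), pvNoDup_eq]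
      by_cases hn : (pvBTiles sol).Nodup
      · rw [if_neg (by simp [PySem.Set.empty, hn]), if_pos (by simpa using hn), ih]
        simp
      · rw [if_pos (by simp [PySem.Set.empty, hn]), if_neg (by simpa using hn), ih]

-- ===== VERDICT (by name: the statement is the Claim_ definition above) =====
theorem filter_non_overlapping_paths_spec : Claim_equal_filter_non_overlapping_paths := by
  intro solutions _
  unfold Spec_filter_non_overlapping_paths filter_non_overlapping_paths
    filter_non_overlapping_paths_alt
  exact pv_spec_aux solutions []
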